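-- pv_equiv track=rewrite | github.com/yibocat/axisfuzzy | axisfuzzy/core/backend.py | _get_high_dim_indices
-- ===== SOURCE A (Python) =====
-- def _get_high_dim_indices(shape: tuple, edge_items: int) -> list:
--     """Generate indices to display for high-dimensional arrays."""
--     indices = []
--
--     def generate_edge_indices(current_shape, current_idx=None):
--         if current_idx is None:
--             current_idx = []
--         if not current_shape:
--             indices.append(tuple(current_idx))
--             return
--
--         dim_size = current_shape[0]
--         remaining_shape = current_shape[1:]
--
--         if dim_size <= 2 * edge_items + 1:
--             for i in range(dim_size):
--                 generate_edge_indices(remaining_shape, current_idx + [i])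
--         else:
--             for i in range(edge_items):
--                 generate_edge_indices(remaining_shape, current_idx + [i])
--             for i in range(dim_size - edge_items, dim_size):
--                 generate_edge_indices(remaining_shape, current_idx + [i])
--
--     generate_edge_indices(shape)
--     return indices
-- ===== SOURCE B (Python) =====
-- import itertools
--
-- def _get_high_dim_indices(shape: tuple, edge_items: int) -> list:
--     """Generate indices to display for high-dimensional arrays."""
--     per_dim = []
--     for d in shape:
--         if d <= 2 * edge_items + 1:
--             idx = list(range(d))
--         else:
--             idx = list(range(edge_items)) + list(range(d - edge_items, d))
--         if not idx:
--             return []  # some axis contributes no indices: the product is empty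
--         per_dim.append(idx)
--     return [tuple(t) for t in itertools.product(*per_dim)]
-- ===== Notes on version B (the rewrite author's own statement) =====
-- stated objective: idiomatic
-- what changed: Replaces the recursive accumulator traversal (nested closure appending to a shared list) by building one explicit per-dimension index list per axis and taking their itertools.product in a single flat pass.
import Mathlib
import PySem

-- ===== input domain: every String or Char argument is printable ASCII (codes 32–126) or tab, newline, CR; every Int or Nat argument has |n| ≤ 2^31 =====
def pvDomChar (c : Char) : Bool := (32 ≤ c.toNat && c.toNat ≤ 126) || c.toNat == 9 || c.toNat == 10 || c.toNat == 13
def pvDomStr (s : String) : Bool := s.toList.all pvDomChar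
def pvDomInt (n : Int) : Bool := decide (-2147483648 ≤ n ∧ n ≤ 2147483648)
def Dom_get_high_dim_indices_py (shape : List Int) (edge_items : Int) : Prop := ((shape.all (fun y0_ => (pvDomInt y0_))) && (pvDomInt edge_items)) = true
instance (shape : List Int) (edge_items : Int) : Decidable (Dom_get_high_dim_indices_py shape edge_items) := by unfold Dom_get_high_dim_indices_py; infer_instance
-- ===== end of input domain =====

-- B replaces A's recursive accumulator traversal by explicit per-dimension index lists combined
-- with a cartesian product (itertools.product); objective: more idiomatic, same cost.

-- ===== PORT A =====
-- A's inner closure generate_edge_indices(current_shape, current_idx): each Python for-loop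
-- appending into the shared `indices` list becomes a flatMap over the same range, in the same order.
def pvGenA (edge_items : Int) : List Int → List Int → List (List Int)
  | [], current_idx => [current_idx]
  | dim_size :: remaining_shape, current_idx =>
    if dim_size ≤ 2 * edge_items + 1 then
      (PySem.List.pyRange 0 dim_size 1).flatMap
        (fun i => pvGenA edge_items remaining_shape (current_idx ++ [i]))
    else
      (PySem.List.pyRange 0 edge_items 1).flatMap
        (fun i => pvGenA edge_items remaining_shape (current_idx ++ [i]))
      ++ (PySem.List.pyRange (dim_size - edge_items) dim_size 1).flatMap
        (fun i => pvGenA edge_items remaining_shape (current_idx ++ [i]))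

def get_high_dim_indices_py (shape : List Int) (edge_items : Int) : List (List Int) :=
  pvGenA edge_items shape []

-- ===== PORT B =====
-- per-dimension index list for one axis of size d
def pvPerDim (edge_items d : Int) : List Int :=
  if d ≤ 2 * edge_items + 1 then PySem.List.pyRange 0 d 1
  else PySem.List.pyRange 0 edge_items 1 ++ PySem.List.pyRange (d - edge_items) d 1

-- itertools.product of a list of lists (rightmost varies fastest)
def pvProduct : List (List Int) → List (List Int)
  | [] => [[]]
  | l :: ls => l.flatMap (fun i => (pvProduct ls).map (fun t => i :: t))

-- B's loop collecting the per-dimension lists; none = the early `return []`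
def pvCollect (edge_items : Int) : List Int → Option (List (List Int))
  | [] => some []
  | d :: rest =>
    let idx := pvPerDim edge_items d
    if idx = [] then none else (pvCollect edge_items rest).map (fun ls => idx :: ls)

def get_high_dim_indices_py_alt (shape : List Int) (edge_items : Int) : List (List Int) :=
  match pvCollect edge_items shape with
  | none => []
  | some per_dim => pvProduct per_dim

-- ===== PRECONDITION & SPEC =====
def Spec_get_high_dim_indices_py (shape : List Int) (edge_items : Int) (out : List (List Int)) : Prop := out = get_high_dim_indices_py_alt shape edge_items
instance (shape : List Int) (edge_items : Int) (out : List (List Int)) : Decidable (Spec_get_high_dim_indices_py shape edge_items out) := by unfold Spec_get_high_dim_indices_py; infer_instance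

-- ===== CLAIM (what is proved, stated in full; the proofs are below) =====
def Claim_equal_get_high_dim_indices_py : Prop := ∀ (shape : List Int) (edge_items : Int), Dom_get_high_dim_indices_py shape edge_items → Spec_get_high_dim_indices_py shape edge_items (get_high_dim_indices_py shape edge_items)

-- ===== LEMMAS AND PROOFS =====

-- A's recursion from accumulator `idx` is B's product of the remaining axes, each tuple
-- prefixed by `idx`.
theorem pvGenA_eq_product (e : Int) (rest : List Int) :
    ∀ idx : List Int,
      pvGenA e rest idx = (pvProduct (rest.map (pvPerDim e))).map (fun t => idx ++ t) := by
  induction rest with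
  | nil => intro idx; simp [pvGenA, pvProduct]
  | cons d rest ih =>
    intro idx
    simp only [pvGenA, List.map_cons, pvProduct, pvPerDim]
    split_ifs with h
    · simp [ih, List.map_flatMap, List.map_map, Function.comp_def]
    · simp [ih, List.map_flatMap, List.map_map, Function.comp_def, List.flatMap_append]

-- a product with an empty factor is empty
theorem pvProduct_of_mem_nil (ls : List (List Int)) (h : [] ∈ ls) : pvProduct ls = [] := by
  induction ls with
  | nil => cases h
  | cons l ls ih =>
    rcases List.mem_cons.mp h with h | h
    · subst h; simp [pvProduct]
    · simp [pvProduct, ih h]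

-- B's early-exit loop, related to the full per-dimension map
theorem pvCollect_spec (e : Int) (shape : List Int) :
    pvCollect e shape = some (shape.map (pvPerDim e)) ∨
    (pvCollect e shape = none ∧ [] ∈ shape.map (pvPerDim e)) := by
  induction shape with
  | nil => left; simp [pvCollect]
  | cons d rest ih =>
    by_cases h : pvPerDim e d = []
    · right; simp [pvCollect, h]
    · rcases ih with ih | ⟨ih, hm⟩
      · left; simp [pvCollect, h, ih]
      · right; simp [pvCollect, h, ih, hm]

-- B equals the plain product of all per-dimension lists
theorem pvAlt_eq_product (shape : List Int) (e : Int) :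
    get_high_dim_indices_py_alt shape e = pvProduct (shape.map (pvPerDim e)) := by
  unfold get_high_dim_indices_py_alt
  rcases pvCollect_spec e shape with h | ⟨h, hm⟩
  · rw [h]
  · rw [h, pvProduct_of_mem_nil _ hm]

-- ===== VERDICT (by name: the statement is the Claim_ definition above) =====
theorem get_high_dim_indices_py_spec : Claim_equal_get_high_dim_indices_py := by
  intro shape edge_items _
  unfold Spec_get_high_dim_indices_py get_high_dim_indices_py
  rw [pvAlt_eq_product]
  simp [pvGenA_eq_product]
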